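-- pv_equiv track=rewrite | github.com/ivanjavierparra/Text-Mining-Austral | final/train_rn.py | pesos
-- ===== SOURCE A (Python) =====
-- def pesos(texto, dic_words):
--   texto = texto.lower()
--   palabras = texto.split(' ')
--   score = 0
--   for palabra in palabras:
--       if palabra in dic_words.keys():
--           score += dic_words[palabra]
--   return score
-- ===== SOURCE B (Python) =====
-- def pesos(texto, dic_words):
--     counts = {}
--     for palabra in texto.lower().split(' '):
--         counts[palabra] = counts.get(palabra, 0) + 1
--     return sum(n * dic_words[palabra] for palabra, n in counts.items() if palabra in dic_words)
-- ===== Notes on version B (the rewrite author's own statement) =====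
-- stated objective: alternative
-- what changed: B first aggregates the split words into a frequency table (hand-built Counter) and then makes one pass over the distinct words, adding count * weight, instead of A's per-occurrence dict lookup and repeated addition.
import Mathlib
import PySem

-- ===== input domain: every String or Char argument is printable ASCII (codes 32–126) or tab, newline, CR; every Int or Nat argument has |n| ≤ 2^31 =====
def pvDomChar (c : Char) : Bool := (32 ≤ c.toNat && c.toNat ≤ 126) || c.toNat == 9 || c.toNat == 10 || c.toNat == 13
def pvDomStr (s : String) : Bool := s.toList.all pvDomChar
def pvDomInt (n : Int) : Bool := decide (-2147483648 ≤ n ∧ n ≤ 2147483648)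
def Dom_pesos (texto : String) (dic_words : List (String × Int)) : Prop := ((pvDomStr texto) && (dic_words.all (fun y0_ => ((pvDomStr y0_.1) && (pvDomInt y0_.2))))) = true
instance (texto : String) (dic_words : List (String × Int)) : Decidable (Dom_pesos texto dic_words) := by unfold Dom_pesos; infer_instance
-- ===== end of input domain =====

-- B aggregates the split words into a frequency table first, then adds count * weight per
-- distinct word in one pass; alternative decomposition, same exact result.

-- ===== PORT A =====
-- texto.split(' ') with the nonempty separator ' ' never raises: split? is always `some` here,
-- so .getD [] is exact.
def pesos (texto : String) (dic_words : List (String × Int)) : Int :=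
  let texto' := PySem.Str.lower texto
  let palabras := (PySem.Str.split? texto' " ").getD []
  let d := PySem.Dict.ofList dic_words
  palabras.foldl (fun score palabra =>
    if d.contains palabra then score + d.getD palabra 0 else score) 0

-- ===== PORT B =====
def pesos_alt (texto : String) (dic_words : List (String × Int)) : Int :=
  let counts := ((PySem.Str.split? (PySem.Str.lower texto) " ").getD []).foldl
    (fun c palabra => c.insert palabra (c.getD palabra 0 + 1)) PySem.Dict.empty
  let d := PySem.Dict.ofList dic_words
  counts.items.foldl (fun s p =>
    if d.contains p.1 then s + p.2 * d.getD p.1 0 else s) 0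

-- ===== PRECONDITION & SPEC =====
def Spec_pesos (texto : String) (dic_words : List (String × Int)) (out : Int) : Prop := out = pesos_alt texto dic_words
instance (texto : String) (dic_words : List (String × Int)) (out : Int) : Decidable (Spec_pesos texto dic_words out) := by unfold Spec_pesos; infer_instance

-- ===== CLAIM (what is proved, stated in full; the proofs are below) =====
def Claim_equal_pesos : Prop := ∀ (texto : String) (dic_words : List (String × Int)), Dom_pesos texto dic_words → Spec_pesos texto dic_words (pesos texto dic_words)

-- ===== LEMMAS AND PROOFS =====

-- a sum over a nodup list that is 0 except at one member picks out that member's value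
theorem pv_sum_map_single (ds : List String) (g : String → Int) (w : String)
    (hnd : ds.Nodup) (hw : w ∈ ds) :
    (ds.map (fun k => if k = w then g k else 0)).sum = g w := by
  induction ds with
  | nil => cases hw
  | cons a t ih =>
    rw [List.map_cons, List.sum_cons]
    rcases List.mem_cons.mp hw with h | h
    · have hz : ∀ k ∈ t, (if k = w then g k else 0) = 0 := by
        intro k hk
        have : k ≠ w := fun e => (List.nodup_cons.mp hnd).1 (h ▸ e ▸ hk)
        simp [this]
      rw [List.map_congr_left hz]
      simp [← h]
    · have hna : ¬ (a = w) := fun e => (List.nodup_cons.mp hnd).1 (e ▸ h)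
      simp [hna, ih (List.nodup_cons.mp hnd).2 h]

-- summing g over ws equals summing (count · * g ·) over any nodup superset of ws's elements
theorem pv_sum_eq_count_sum (ws ds : List String) (g : String → Int)
    (hnd : ds.Nodup) (hsub : ∀ w ∈ ws, w ∈ ds) :
    (ws.map g).sum = (ds.map (fun k => (ws.count k : Int) * g k)).sum := by
  induction ws with
  | nil => simp
  | cons w t ih =>
    have ht : ∀ x ∈ t, x ∈ ds := fun x hx => hsub x (List.mem_cons_of_mem _ hx)
    have hmap : ∀ k ∈ ds,
        ((w :: t).count k : Int) * g k
          = (t.count k : Int) * g k + (if k = w then g k else 0) := by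
      intro k _
      by_cases h : k = w
      · simp [h]; ring
      · simp only [List.count_cons, beq_iff_eq, h, if_false, add_zero]
        rw [if_neg (fun e => h e.symm)]
        simp
    calc (List.map g (w :: t)).sum
        = (t.map g).sum + g w := by simp; ring
      _ = (ds.map (fun k => (t.count k : Int) * g k)).sum
            + (ds.map (fun k => if k = w then g k else 0)).sum := by
          rw [ih ht, pv_sum_map_single ds g w hnd (hsub w (List.mem_cons_self))]
      _ = (ds.map (fun k => ((w :: t).count k : Int) * g k)).sum := by
          rw [List.map_congr_left hmap]
          simp [List.sum_map_add]

-- ===== VERDICT (by name: the statement is the Claim_ definition above) =====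
theorem pesos_spec : Claim_equal_pesos := by
  intro texto dic_words _
  simp only [Spec_pesos, pesos, pesos_alt]
  set ws := (PySem.Str.split? (PySem.Str.lower texto) " ").getD [] with hws
  set d := PySem.Dict.ofList dic_words with hd
  rw [PySem.Dict.foldl_insert_getD_add_one_eq_counter]
  rw [PySem.Dict.items_counter, List.foldl_map]
  have hA : ws.foldl (fun score palabra =>
      if d.contains palabra then score + d.getD palabra 0 else score) 0
      = ws.foldl (fun score palabra =>
      score + (if d.contains palabra then d.getD palabra 0 else 0)) 0 := by
    apply PySem.List.foldl_congr_mem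
    intro acc x _
    by_cases h : d.contains x <;> simp [h]
  rw [hA, PySem.List.foldl_add]

  have hB : (PySem.Set.ofList ws).foldl (fun x y =>
      if d.contains (y, ((List.count y ws : Nat) : Int)).1 then
        x + (y, ((List.count y ws : Nat) : Int)).2 * d.getD (y, ((List.count y ws : Nat) : Int)).1 0
      else x) 0
      = (PySem.Set.ofList ws).foldl (fun x y =>
      x + (List.count y ws : Int) * (if d.contains y then d.getD y 0 else 0)) 0 := by
    apply PySem.List.foldl_congr_mem
    intro acc x _
    by_cases h : d.contains x <;> simp [h]
  rw [hB]
  have hsum := pv_sum_eq_count_sum ws (PySem.Set.ofList ws)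
    (fun palabra => if d.contains palabra then d.getD palabra 0 else 0)
    (PySem.Set.nodup_ofList ws)
    (fun w hw => (PySem.Set.mem_ofList ws w).mpr hw)
  rw [zero_add]
  rw [hsum]
  exact ((PySem.List.foldl_add (PySem.Set.ofList ws)
    (fun k => (List.count k ws : Int) * (if d.contains k then d.getD k 0 else 0)) 0).trans
    (zero_add _)).symm
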